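-- pv_equiv track=rewrite | github.com/gramnegrod/liquid-audio | cpu-test/calibration_experiment.py | build_history_from_context
-- ===== SOURCE A (Python) =====
-- def build_history_from_context(context_setup: str) -> list:
--     """Convert context string to conversation history format."""
--     if not context_setup:
--         return []
--
--     # Parse multi-turn format if present
--     if "User:" in context_setup and "Assistant:" in context_setup:
--         history = []
--         lines = context_setup.strip().split("\n")
--         current_user = None
--         current_assistant = None
--
--         for line in lines:
--             if line.startswith("User: "):
--                 if current_user and current_assistant:
--                     history.append({"user": current_user, "assistant": current_assistant})
--                 current_user = line[6:]
--                 current_assistant = None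
--             elif line.startswith("Assistant: "):
--                 current_assistant = line[11:]
--
--         if current_user and current_assistant:
--             history.append({"user": current_user, "assistant": current_assistant})
--         return history
--
--     # Single statement becomes a user/assistant pair
--     return [{"user": context_setup, "assistant": "I understand. Let me help with that."}]
-- ===== SOURCE B (Python) =====
-- def build_history_from_context(context_setup: str) -> list:
--     """Convert context string to conversation history format."""
--     if not context_setup:
--         return []
--     if "User:" in context_setup and "Assistant:" in context_setup:
--         lines = context_setup.strip().split("\n")
--         return _pairs(lines)
--     return [{"user": context_setup, "assistant": "I understand. Let me help with that."}]
--
--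
-- def _span_non_user(lines):
--     """Split lines into (prefix before the first 'User: ' line, the rest)."""
--     for i, ln in enumerate(lines):
--         if ln.startswith("User: "):
--             return lines[:i], lines[i:]
--     return lines, []
--
--
-- def _last_assistant(seg):
--     """Content of the last 'Assistant: ' line in seg (empty string if none)."""
--     a = ""
--     for ln in seg:
--         if ln.startswith("Assistant: "):
--             a = ln[11:]
--     return a
--
--
-- def _pairs(lines):
--     """Recursively build the history, one 'User: '-led segment at a time."""
--     if not lines:
--         return []
--     if not lines[0].startswith("User: "):
--         return _pairs(lines[1:])
--     u = lines[0][6:]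
--     seg, tail = _span_non_user(lines[1:])
--     a = _last_assistant(seg)
--     pair = [{"user": u, "assistant": a}] if (u and a) else []
--     return pair + _pairs(tail)
-- ===== Notes on version B (the rewrite author's own statement) =====
-- stated objective: alternative
-- what changed: Replaces A's single streaming loop with carried current-user/current-assistant state by a recursive segment decomposition: skip to each user-prefixed line, span off its segment up to the next user-prefixed line, scan that segment for the last assistant-prefixed line, and emit the pair.
import Mathlib
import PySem

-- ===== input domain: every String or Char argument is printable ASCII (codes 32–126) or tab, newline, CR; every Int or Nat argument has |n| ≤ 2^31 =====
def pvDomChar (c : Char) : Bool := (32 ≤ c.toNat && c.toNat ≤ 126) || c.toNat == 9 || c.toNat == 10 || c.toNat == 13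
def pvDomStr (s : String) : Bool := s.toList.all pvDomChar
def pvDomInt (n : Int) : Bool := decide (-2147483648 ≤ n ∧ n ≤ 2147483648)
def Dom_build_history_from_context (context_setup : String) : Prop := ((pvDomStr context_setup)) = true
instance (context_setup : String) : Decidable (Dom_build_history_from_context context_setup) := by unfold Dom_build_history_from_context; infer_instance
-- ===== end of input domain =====

-- B replaces A's single streaming carry-state loop by a recursive segment decomposition
-- (skip to each "User: " line, then scan just that segment for its last assistant line);
-- objective: alternative decomposition, same cost.

-- ===== PORT A =====
-- Python truthiness of an Optional[str]: None and "" are falsy.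
def pvTruthy (o : Option String) : Bool :=
  match o with
  | none => false
  | some s => s != ""

-- one iteration of A's for-loop; state = (history, current_user, current_assistant)
def pvAStep (st : List (List (String × String)) × Option String × Option String)
    (line : String) : List (List (String × String)) × Option String × Option String :=
  if PySem.Str.startswith line "User: " then
    ((if pvTruthy st.2.1 && pvTruthy st.2.2 then
        st.1 ++ [[("user", (st.2.1).getD ""), ("assistant", (st.2.2).getD "")]]
      else st.1),
     some (PySem.Str.slice line (some 6) none), none)
  else if PySem.Str.startswith line "Assistant: " then
    (st.1, st.2.1, some (PySem.Str.slice line (some 11) none))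
  else st

def build_history_from_context (context_setup : String) : List (List (String × String)) :=
  if context_setup == "" then []
  else if PySem.Str.isIn "User:" context_setup && PySem.Str.isIn "Assistant:" context_setup then
    let lines := (PySem.Str.split? (PySem.Str.strip context_setup) "\n").getD []
    let st := lines.foldl pvAStep ([], none, none)
    if pvTruthy st.2.1 && pvTruthy st.2.2 then
      st.1 ++ [[("user", (st.2.1).getD ""), ("assistant", (st.2.2).getD "")]]
    else st.1
  else [[("user", context_setup), ("assistant", "I understand. Let me help with that.")]]

-- ===== PORT B =====
-- _span_non_user: (prefix before the first "User: " line, the rest)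
def pvSpanNonUser : List String → List String × List String
  | [] => ([], [])
  | ln :: rest =>
    if PySem.Str.startswith ln "User: " then ([], ln :: rest)
    else
      let p := pvSpanNonUser rest
      (ln :: p.1, p.2)

theorem pvSpanNonUser_snd_length_le (ls : List String) :
    (pvSpanNonUser ls).2.length ≤ ls.length := by
  induction ls with
  | nil => simp [pvSpanNonUser]
  | cons l ls ih =>
    simp only [pvSpanNonUser]
    split
    · simp
    · simpa using Nat.le_succ_of_le ih

-- _last_assistant: content of the last "Assistant: " line of a segment ("" if none)
def pvLastAssistant (seg : List String) : String :=
  seg.foldl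
    (fun a ln =>
      if PySem.Str.startswith ln "Assistant: " then PySem.Str.slice ln (some 11) none else a) ""

-- _pairs: recursion over "User: "-led segments
def pvPairs : List String → List (List (String × String))
  | [] => []
  | l :: ls =>
    if PySem.Str.startswith l "User: " then
      let u := PySem.Str.slice l (some 6) none
      let a := pvLastAssistant (pvSpanNonUser ls).1
      (if u != "" && a != "" then [[("user", u), ("assistant", a)]] else [])
        ++ pvPairs (pvSpanNonUser ls).2
    else pvPairs ls
termination_by ls => ls.length
decreasing_by
  · exact Nat.lt_succ_of_le (pvSpanNonUser_snd_length_le ls)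
  · exact Nat.lt_succ_self _

def build_history_from_context_alt (context_setup : String) : List (List (String × String)) :=
  if context_setup == "" then []
  else if PySem.Str.isIn "User:" context_setup && PySem.Str.isIn "Assistant:" context_setup then
    let lines := (PySem.Str.split? (PySem.Str.strip context_setup) "\n").getD []
    pvPairs lines
  else [[("user", context_setup), ("assistant", "I understand. Let me help with that.")]]

-- ===== PRECONDITION & SPEC =====
def Spec_build_history_from_context (context_setup : String) (out : List (List (String × String))) : Prop := out = build_history_from_context_alt context_setup
instance (context_setup : String) (out : List (List (String × String))) : Decidable (Spec_build_history_from_context context_setup out) := by unfold Spec_build_history_from_context; infer_instance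

-- ===== CLAIM (what is proved, stated in full; the proofs are below) =====
def Claim_equal_build_history_from_context : Prop := ∀ (context_setup : String), Dom_build_history_from_context context_setup → Spec_build_history_from_context context_setup (build_history_from_context context_setup)

-- ===== LEMMAS AND PROOFS =====

-- A's flush (the "if current_user and current_assistant: append" step), as a function
def pvFlush (st : List (List (String × String)) × Option String × Option String) :
    List (List (String × String)) :=
  if pvTruthy st.2.1 && pvTruthy st.2.2 then
    st.1 ++ [[("user", (st.2.1).getD ""), ("assistant", (st.2.2).getD "")]]
  else st.1

-- B's "emit a pair if both parts are truthy"
def pvEmit (u a : String) : List (List (String × String)) :=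
  if u != "" && a != "" then [[("user", u), ("assistant", a)]] else []

-- _last_assistant's loop body
def pvLAStep (a : String) (ln : String) : String :=
  if PySem.Str.startswith ln "Assistant: " then PySem.Str.slice ln (some 11) none else a

theorem pvLastAssistant_eq_foldl (seg : List String) :
    pvLastAssistant seg = seg.foldl pvLAStep "" := rfl

theorem pvFlush_eq_emit (hist : List (List (String × String))) (cu ca : Option String) :
    pvFlush (hist, cu, ca) = hist ++ pvEmit (cu.getD "") (ca.getD "") := by
  cases cu <;> cases ca <;> simp [pvFlush, pvEmit, pvTruthy] <;> split_ifs <;> simp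

-- Main invariant: flushing A's loop run from any carried state equals the carried pair's
-- emission followed by B's segment recursion on the remainder.
theorem pvMain (ls : List String) (hist : List (List (String × String)))
    (cu ca : Option String) :
    pvFlush (ls.foldl pvAStep (hist, cu, ca)) =
      hist ++ pvEmit (cu.getD "") ((pvSpanNonUser ls).1.foldl pvLAStep (ca.getD ""))
        ++ pvPairs (pvSpanNonUser ls).2 := by
  induction ls generalizing hist cu ca with
  | nil => simp [pvSpanNonUser, pvPairs, pvFlush_eq_emit]
  | cons l ls ih =>
    by_cases hu : PySem.Str.startswith l "User: " = true
    · have hstep : pvAStep (hist, cu, ca) l =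
          (pvFlush (hist, cu, ca), some (PySem.Str.slice l (some 6) none), none) := by
        simp only [pvAStep, pvFlush]
        rw [if_pos hu]
      rw [List.foldl_cons, hstep, ih, pvFlush_eq_emit]
      simp only [pvSpanNonUser]
      rw [if_pos hu]
      simp only [pvPairs]
      rw [if_pos hu]
      simp only [pvLastAssistant_eq_foldl, List.foldl_nil, Option.getD_some, Option.getD_none,
        pvEmit, List.append_assoc]
    · by_cases ha : PySem.Str.startswith l "Assistant: " = true
      · have hstep : pvAStep (hist, cu, ca) l =
            (hist, cu, some (PySem.Str.slice l (some 11) none)) := by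
          simp only [pvAStep]
          rw [if_neg hu, if_pos ha]
        rw [List.foldl_cons, hstep, ih]
        simp only [pvSpanNonUser]
        rw [if_neg hu]
        simp only [List.foldl_cons, pvLAStep, Option.getD_some]
        rw [if_pos ha]
      · have hstep : pvAStep (hist, cu, ca) l = (hist, cu, ca) := by
          simp only [pvAStep]
          rw [if_neg hu, if_neg ha]
        rw [List.foldl_cons, hstep, ih]
        simp only [pvSpanNonUser]
        rw [if_neg hu]
        simp only [List.foldl_cons, pvLAStep]
        rw [if_neg ha]

-- B's recursion ignores a non-"User: " prefix
theorem pvPairs_span (ls : List String) : pvPairs ls = pvPairs (pvSpanNonUser ls).2 := by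
  induction ls with
  | nil => simp [pvSpanNonUser]
  | cons l ls ih =>
    by_cases hu : PySem.Str.startswith l "User: " = true
    · simp only [pvSpanNonUser]
      rw [if_pos hu]
    · have h1 : pvPairs (l :: ls) = pvPairs ls := by
        simp only [pvPairs]
        rw [if_neg hu]
      rw [h1, ih]
      simp only [pvSpanNonUser]
      rw [if_neg hu]

theorem pvAB (s : String) : build_history_from_context s = build_history_from_context_alt s := by
  unfold build_history_from_context build_history_from_context_alt
  by_cases h0 : (s == "") = true
  · rw [if_pos h0, if_pos h0]
  · rw [if_neg h0, if_neg h0]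
    by_cases hb : (PySem.Str.isIn "User:" s && PySem.Str.isIn "Assistant:" s) = true
    · rw [if_pos hb, if_pos hb]
      show pvFlush (((PySem.Str.split? (PySem.Str.strip s) "\n").getD []).foldl
          pvAStep ([], none, none)) =
        pvPairs ((PySem.Str.split? (PySem.Str.strip s) "\n").getD [])
      rw [pvMain, pvPairs_span ((PySem.Str.split? (PySem.Str.strip s) "\n").getD [])]
      simp [pvEmit]
    · rw [if_neg hb, if_neg hb]

-- ===== VERDICT (by name: the statement is the Claim_ definition above) =====
theorem build_history_from_context_spec : Claim_equal_build_history_from_context := by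
  intro s _
  unfold Spec_build_history_from_context
  exact pvAB s
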